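-- pv_equiv track=rewrite | github.com/Hk4Fun/algorithm_offer | campus_interview/3_合唱.py | chorus
-- ===== SOURCE A (Python) =====
-- def chorus(nums):
--     n = len(nums)
--     dp = [[0] * n for _ in range(n)]
--     for i in range(2, n):
--         dp[i][i - 1] = dp[i - 1][i - 2] + abs(nums[i - 1] - nums[i - 2])
--     for i in range(2, n):
--         for j in range(i - 1):
--             dp[i][j] = dp[i - 1][j] + abs(nums[i] - nums[i - 1])
--             dp[i][i - 1] = min(dp[i][i - 1], dp[i - 1][j] + abs(nums[i] - nums[j]))
--     return min(dp[-1][:-1])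
-- ===== SOURCE B (Python) =====
-- def chorus(nums):
--     # One-dimensional reformulation: dp[i][j] = t[j] + S_i, so only the
--     # "t" sequence and the running prefix sum of adjacent gaps are kept.
--     n = len(nums)
--     t = [-abs(nums[1] - nums[0])]
--     for r in range(1, n - 1):
--         x = nums[r + 1]
--         best = 0
--         for j in range(r):
--             best = min(best, t[j] + abs(x - nums[j]))
--         t.append(best - abs(x - nums[r]))
--     total = sum(abs(nums[k] - nums[k - 1]) for k in range(1, n))
--     return total + min(t)
-- ===== Notes on version B (the rewrite author's own statement) =====
-- stated objective: faster
-- what changed: Replaces the n-by-n DP table and its two loop nests (diagonal pre-fill plus row-recopy) by the diagonal reformulation dp[i][j] = t[j] + S_i: only the 1-D list t and a running prefix sum of adjacent gaps are kept, so the quadratic table disappears.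
import Mathlib
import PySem

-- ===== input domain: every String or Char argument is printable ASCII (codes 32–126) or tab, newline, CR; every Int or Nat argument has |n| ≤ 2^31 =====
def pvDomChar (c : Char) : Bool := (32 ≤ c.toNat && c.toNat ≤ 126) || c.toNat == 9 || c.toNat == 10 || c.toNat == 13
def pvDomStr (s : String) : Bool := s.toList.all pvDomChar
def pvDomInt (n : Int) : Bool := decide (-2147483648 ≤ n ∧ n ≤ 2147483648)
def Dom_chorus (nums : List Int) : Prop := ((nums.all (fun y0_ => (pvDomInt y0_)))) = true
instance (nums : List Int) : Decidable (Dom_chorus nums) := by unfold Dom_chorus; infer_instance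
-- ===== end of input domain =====

-- B removes A's n×n DP table: dp[i][j] = t[j] + S_i, so it keeps only the 1-D list t
-- and a running prefix sum of adjacent gaps (same O(n^2) time, O(n) space).

-- ===== PORT A =====
-- dp[i][j] read / write; the indices A uses come from range(...) so they are
-- nonnegative and in range (exact there; .set is only reached in range).
def dpRead (dp : List (List Int)) (i j : Int) : Int :=
  PySem.List.pyGetD (PySem.List.pyGetD dp i []) j 0

def dpWrite (dp : List (List Int)) (i j : Int) (v : Int) : List (List Int) :=
  dp.set i.toNat ((PySem.List.pyGetD dp i []).set j.toNat v)

def chorus (nums : List Int) : Int :=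
  let n : Int := nums.length
  let dp0 : List (List Int) :=
    List.replicate nums.length (List.replicate nums.length (0 : Int))
  let dp1 := (PySem.List.pyRange 2 n 1).foldl (fun dp i =>
      dpWrite dp i (i - 1) (dpRead dp (i - 1) (i - 2) +
        |PySem.List.pyGetD nums (i - 1) 0 - PySem.List.pyGetD nums (i - 2) 0|)) dp0
  let dp2 := (PySem.List.pyRange 2 n 1).foldl (fun dp i =>
      (PySem.List.pyRange 0 (i - 1) 1).foldl (fun dp j =>
        let dp' := dpWrite dp i j (dpRead dp (i - 1) j +
          |PySem.List.pyGetD nums i 0 - PySem.List.pyGetD nums (i - 1) 0|)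
        dpWrite dp' i (i - 1) (min (dpRead dp' i (i - 1))
          (dpRead dp' (i - 1) j +
            |PySem.List.pyGetD nums i 0 - PySem.List.pyGetD nums j 0|))) dp) dp1
  (PySem.List.min? (PySem.List.slice (PySem.List.pyGetD dp2 (-1) []) none (some (-1)))
      (fun x => x)).getD 0

-- ===== PORT B =====
def chorus_alt (nums : List Int) : Int :=
  let n : Int := nums.length
  let t0 : List Int := [-|PySem.List.pyGetD nums 1 0 - PySem.List.pyGetD nums 0 0|]
  let t := (PySem.List.pyRange 1 (n - 1) 1).foldl (fun t r =>
      let x := PySem.List.pyGetD nums (r + 1) 0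
      let best := (PySem.List.pyRange 0 r 1).foldl (fun best j =>
          min best (PySem.List.pyGetD t j 0 + |x - PySem.List.pyGetD nums j 0|)) 0
      t ++ [best - |x - PySem.List.pyGetD nums r 0|]) t0
  let total := (PySem.List.pyRange 1 n 1).foldl (fun acc k =>
      acc + |PySem.List.pyGetD nums k 0 - PySem.List.pyGetD nums (k - 1) 0|) 0
  total + (PySem.List.min? t (fun x => x)).getD 0

-- ===== PRECONDITION & SPEC =====
-- A raises on lists of length < 2 (IndexError on dp[-1] for [], ValueError min([]) for one element).
def Pre_chorus (nums : List Int) : Prop := 2 ≤ nums.length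
instance (nums : List Int) : Decidable (Pre_chorus nums) := by unfold Pre_chorus; infer_instance

def pvWitness_chorus : List Int := [1, 5, 2]

def Spec_chorus (nums : List Int) (out : Int) : Prop := out = chorus_alt nums
instance (nums : List Int) (out : Int) : Decidable (Spec_chorus nums out) := by
  unfold Spec_chorus; infer_instance

-- ===== CLAIM (what is proved, stated in full; the proofs are below) =====
def Claim_equal_chorus : Prop :=
  ∀ (nums : List Int), Dom_chorus nums → Pre_chorus nums → Spec_chorus nums (chorus nums)

-- ===== LEMMAS AND PROOFS =====

-- nums[k] for the in-range Nat indices used below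
def aGet (nums : List Int) (k : Nat) : Int := nums.getD k 0

-- S k = Σ_{1≤i≤k} |a_i - a_{i-1}|
def Sacc (nums : List Int) : Nat → Int
  | 0 => 0
  | k + 1 => Sacc nums k + |aGet nums (k + 1) - aGet nums k|

-- the sequence t_j = dp[j+1][j] - S_{j+1}, built left to right
def tvec (nums : List Int) : Nat → List Int
  | 0 => []
  | m + 1 =>
    let tm := tvec nums m
    tm ++ [((List.range m).foldl
        (fun b j => min b (tm.getD j 0 + |aGet nums (m + 1) - aGet nums j|)) 0)
      - |aGet nums (m + 1) - aGet nums m|]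

def tfun (nums : List Int) (m : Nat) : Int := (tvec nums (m + 1)).getD m 0

-- canonical table shape
def dpfun (n : Nat) (f : Nat → Nat → Int) : List (List Int) :=
  (List.range n).map (fun i => (List.range n).map (f i))

theorem tvec_length (nums : List Int) (m : Nat) : (tvec nums m).length = m := by
  induction m with
  | zero => rfl
  | succ m ih => simp [tvec, ih]

theorem tvec_succ (nums : List Int) (m : Nat) :
    tvec nums (m + 1) = tvec nums m ++
      [((List.range m).foldl
          (fun b j => min b ((tvec nums m).getD j 0 + |aGet nums (m + 1) - aGet nums j|)) 0)
        - |aGet nums (m + 1) - aGet nums m|] := rfl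

theorem tvec_eq_map (nums : List Int) (m : Nat) :
    tvec nums m = (List.range m).map (tfun nums) := by
  induction m with
  | zero => rfl
  | succ m ih =>
    have h : tfun nums m = ((List.range m).foldl
        (fun b j => min b ((tvec nums m).getD j 0 + |aGet nums (m + 1) - aGet nums j|)) 0)
        - |aGet nums (m + 1) - aGet nums m| := by
      have hl := tvec_length nums m
      have hx : ∀ (l : List Int) (x : Int), (l ++ [x]).getD l.length 0 = x := by
        intro l x
        simp [List.getD_eq_getElem?_getD]
      unfold tfun
      rw [tvec_succ]
      simpa [hl] using hx (tvec nums m) _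
    rw [tvec_succ, List.range_succ, List.map_append, List.map_singleton, ← ih, h]

theorem tfun_zero (nums : List Int) : tfun nums 0 = -(Sacc nums 1) := by
  simp [tfun, tvec, Sacc]

theorem tvec_getD (nums : List Int) (m j : Nat) (h : j < m) :
    (tvec nums m).getD j 0 = tfun nums j := by
  rw [tvec_eq_map, PySem.List.getD_map_range _ _ _ _ h]

-- pull an additive constant out of a running-min fold
theorem foldl_min_add (l : List Nat) (f : Nat → Int) (c b : Int) :
    l.foldl (fun b j => min b (f j + c)) (b + c)
      = l.foldl (fun b j => min b (f j)) b + c := by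
  induction l generalizing b with
  | nil => rfl
  | cons x xs ih => simpa [min_add_add_right] using ih (min b (f x))

theorem foldl_min_add_int (l : List Int) (c b : Int) :
    (l.map (fun x => x + c)).foldl min (b + c) = l.foldl min b + c := by
  induction l generalizing b with
  | nil => rfl
  | cons x xs ih => simpa [min_add_add_right] using ih (min b x)

-- reading / writing the canonical table
theorem dpfun_read (n : Nat) (f : Nat → Nat → Int) (i j : Nat) (hi : i < n) (hj : j < n) :
    dpRead (dpfun n f) (i : Int) (j : Int) = f i j := by
  unfold dpRead dpfun
  simp only [PySem.List.pyGetD_natCast]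
  rw [PySem.List.getD_map_range _ _ _ _ hi, PySem.List.getD_map_range _ _ _ _ hj]

theorem set_map_range {α : Type} (n i : Nat) (f : Nat → α) (v : α) (_hi : i < n) :
    ((List.range n).map f).set i v
      = (List.range n).map (fun k => if k = i then v else f k) := by
  apply List.ext_getElem
  · simp
  · intro k h1 h2
    simp only [List.getElem_set, List.getElem_map, List.getElem_range]
    by_cases hk : i = k
    · subst hk; simp
    · rw [if_neg hk, if_neg (Ne.symm hk)]

theorem dpfun_write (n : Nat) (f : Nat → Nat → Int) (i j : Nat) (v : Int)
    (hi : i < n) (hj : j < n) :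
    dpWrite (dpfun n f) (i : Int) (j : Int) v
      = dpfun n (fun p q => if p = i ∧ q = j then v else f p q) := by
  unfold dpWrite dpfun
  rw [PySem.List.pyGetD_natCast, PySem.List.getD_map_range _ _ _ _ hi]
  rw [Int.toNat_natCast, Int.toNat_natCast, set_map_range n j _ v hj]
  have : ((List.range n).map (fun i => (List.range n).map (f i))).set i
      ((List.range n).map (fun k => if k = j then v else f i k))
      = (List.range n).map (fun p => if p = i then
          ((List.range n).map (fun k => if k = j then v else f i k)) else
          (List.range n).map (f p)) := set_map_range n i _ _ hi
  rw [this]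
  apply List.map_congr_left
  intro p _
  by_cases hp : p = i
  · subst hp
    simp only [if_pos trivial]
    apply List.map_congr_left
    intro q _
    by_cases hq : q = j <;> simp [hq]
  · simp only [if_neg hp]
    apply List.map_congr_left
    intro q _
    simp [hp]

theorem dpfun_congr (n : Nat) (f g : Nat → Nat → Int)
    (h : ∀ p q, p < n → q < n → f p q = g p q) : dpfun n f = dpfun n g := by
  unfold dpfun
  apply List.map_congr_left
  intro p hp
  apply List.map_congr_left
  intro q hq
  exact h p q (List.mem_range.mp hp) (List.mem_range.mp hq)

-- the table functions
def T1 (nums : List Int) (m : Nat) : Nat → Nat → Int := fun i j =>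
  if 2 ≤ i ∧ i < m ∧ j + 1 = i then Sacc nums (i - 1) else 0

def T2 (nums : List Int) (m : Nat) : Nat → Nat → Int := fun i j =>
  if 2 ≤ i ∧ i < m ∧ j < i then tfun nums j + Sacc nums i
  else T1 nums nums.length i j


theorem pyGetD_aGet (nums : List Int) (k : Nat) :
    PySem.List.pyGetD nums (k : Int) 0 = aGet nums k := PySem.List.pyGetD_natCast nums k 0

theorem tfun_succ (nums : List Int) (m : Nat) :
    tfun nums m = ((List.range m).foldl
        (fun b j => min b (tfun nums j + |aGet nums (m + 1) - aGet nums j|)) 0)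
      - |aGet nums (m + 1) - aGet nums m| := by
  have hl := tvec_length nums m
  have hx : ∀ (l : List Int) (x : Int), (l ++ [x]).getD l.length 0 = x := by
    intro l x
    simp [List.getD_eq_getElem?_getD]
  unfold tfun
  rw [tvec_succ]
  have h := hx (tvec nums m) (((List.range m).foldl
      (fun b j => min b ((tvec nums m).getD j 0 + |aGet nums (m + 1) - aGet nums j|)) 0)
    - |aGet nums (m + 1) - aGet nums m|)
  rw [hl] at h
  rw [h]
  congr 1
  apply PySem.List.foldl_congr_mem
  intro acc x hxm
  rw [tvec_getD nums m x (List.mem_range.mp hxm)]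
  rfl

theorem dp0_eq (n : Nat) :
    List.replicate n (List.replicate n (0 : Int)) = dpfun n (fun _ _ => 0) := by
  unfold dpfun
  rw [List.map_const', List.length_range, List.map_const', List.length_range]

theorem phase1 (nums : List Int) (m : Nat) (hm : m ≤ nums.length) :
    (PySem.List.pyRange 2 (m : Int) 1).foldl (fun dp i =>
      dpWrite dp i (i - 1) (dpRead dp (i - 1) (i - 2) +
        |PySem.List.pyGetD nums (i - 1) 0 - PySem.List.pyGetD nums (i - 2) 0|))
      (List.replicate nums.length (List.replicate nums.length (0 : Int)))
      = dpfun nums.length (T1 nums m) := by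
  induction m with
  | zero =>
    rw [PySem.List.pyRange_one_eq_nil (by norm_num), List.foldl_nil, dp0_eq]
    apply dpfun_congr
    intro p q _ _
    unfold T1
    rw [if_neg (by omega)]
  | succ m ih =>
    by_cases h2 : 2 ≤ m
    · have hmn : m < nums.length := by omega
      have hcast : ((m + 1 : Nat) : Int) = (m : Int) + 1 := by push_cast; ring
      rw [hcast, PySem.List.pyRange_one_succ_right (by exact_mod_cast h2), List.foldl_append,
        ih (by omega), List.foldl_cons, List.foldl_nil]
      have e1 : ((m : Int) - 1) = ((m - 1 : Nat) : Int) := by omega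
      have e2 : ((m : Int) - 2) = ((m - 2 : Nat) : Int) := by omega
      rw [e1, e2, pyGetD_aGet, pyGetD_aGet,
        dpfun_read _ _ _ _ (by omega) (by omega),
        dpfun_write _ _ _ _ _ hmn (by omega)]
      have hT : T1 nums m (m - 1) (m - 2) = Sacc nums (m - 2) := by
        unfold T1
        split_ifs with hc
        · have he : m - 1 - 1 = m - 2 := by omega
          rw [he]
        · have hm2 : m = 2 := by omega
          subst hm2
          simp [Sacc]
      rw [hT]
      have hS : Sacc nums (m - 2) + |aGet nums (m - 1) - aGet nums (m - 2)|
          = Sacc nums (m - 1) := by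
        have he : m - 1 = (m - 2) + 1 := by omega
        rw [he]
        rfl
      rw [hS]
      apply dpfun_congr
      intro p q hp hq
      by_cases hpq : p = m ∧ q = m - 1
      · obtain ⟨h1', h2'⟩ := hpq
        subst h1'
        subst h2'
        rw [if_pos ⟨rfl, rfl⟩]
        unfold T1
        rw [if_pos ⟨by omega, by omega, by omega⟩]
      · rw [if_neg hpq]
        unfold T1
        split_ifs with c1 c2 c2
        · rfl
        · exfalso
          exact c2 ⟨c1.1, by omega, c1.2.2⟩
        · exfalso
          by_cases hpm : p < m
          · exact c1 ⟨c2.1, hpm, c2.2.2⟩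
          · exact hpq ⟨by omega, by omega⟩
        · rfl
    · rw [PySem.List.pyRange_one_eq_nil (by exact_mod_cast (by omega : (m:Nat) + 1 ≤ 2)), List.foldl_nil, dp0_eq]
      apply dpfun_congr
      intro p q _ _
      unfold T1
      rw [if_neg (by omega)]

-- inner loop invariant: Q J is dp[m][m-1] after J inner steps processing row m
def Qfold (nums : List Int) (m J : Nat) : Int :=
  (List.range J).foldl
    (fun b j => min b ((tfun nums j + |aGet nums m - aGet nums j|) + Sacc nums (m - 1)))
    (Sacc nums (m - 1))

theorem Qfold_succ (nums : List Int) (m J : Nat) :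
    Qfold nums m (J + 1) = min (Qfold nums m J)
      ((tfun nums J + |aGet nums m - aGet nums J|) + Sacc nums (m - 1)) := by
  simp [Qfold, List.range_succ]

theorem Qfold_eq (nums : List Int) (m J : Nat) :
    Qfold nums m J = ((List.range J).foldl
        (fun b j => min b (tfun nums j + |aGet nums m - aGet nums j|)) 0)
      + Sacc nums (m - 1) := by
  have h := foldl_min_add (List.range J)
    (fun j => tfun nums j + |aGet nums m - aGet nums j|) (Sacc nums (m - 1)) 0
  simpa [Qfold] using h

theorem Qfold_final (nums : List Int) (m : Nat) (h1 : 1 ≤ m) :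
    Qfold nums m (m - 1) = tfun nums (m - 1) + Sacc nums m := by
  have he : m = (m - 1) + 1 := by omega
  have ht := tfun_succ nums (m - 1)
  rw [← he] at ht
  have hs : Sacc nums m = Sacc nums (m - 1) + |aGet nums m - aGet nums (m - 1)| := by
    conv_lhs => rw [he]
    rw [Sacc, ← he]
  rw [Qfold_eq, show ((List.range (m - 1)).foldl
      (fun b j => min b (tfun nums j + |aGet nums m - aGet nums j|)) 0)
      = tfun nums (m - 1) + |aGet nums m - aGet nums (m - 1)| from by rw [ht]; ring, hs]
  ring

theorem T2_row (nums : List Int) (m J : Nat) (h2 : 2 ≤ m) (hmn : m < nums.length)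
    (hJ : J < m - 1) : T2 nums m (m - 1) J = tfun nums J + Sacc nums (m - 1) := by
  unfold T2
  split_ifs with hc
  · rfl
  · have hm2 : m = 2 := by omega
    have hJ0 : J = 0 := by omega
    subst hm2
    subst hJ0
    unfold T1
    rw [if_neg (by omega), tfun_zero]
    ring

theorem inner_loop (nums : List Int) (m : Nat) (h2 : 2 ≤ m) (hmn : m < nums.length)
    (JI : Int) (J : Nat) (hJI : JI = (J : Int)) (hJ : J ≤ m - 1) :
    (PySem.List.pyRange 0 JI 1).foldl (fun dp j =>
        dpWrite (dpWrite dp (m : Int) j (dpRead dp ((m : Int) - 1) j +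
            |PySem.List.pyGetD nums (m : Int) 0 - PySem.List.pyGetD nums ((m : Int) - 1) 0|))
          (m : Int) ((m : Int) - 1)
          (min (dpRead (dpWrite dp (m : Int) j (dpRead dp ((m : Int) - 1) j +
              |PySem.List.pyGetD nums (m : Int) 0 - PySem.List.pyGetD nums ((m : Int) - 1) 0|))
              (m : Int) ((m : Int) - 1))
            (dpRead (dpWrite dp (m : Int) j (dpRead dp ((m : Int) - 1) j +
              |PySem.List.pyGetD nums (m : Int) 0 - PySem.List.pyGetD nums ((m : Int) - 1) 0|))
              ((m : Int) - 1) j +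
              |PySem.List.pyGetD nums (m : Int) 0 - PySem.List.pyGetD nums j 0|)))
      (dpfun nums.length (T2 nums m))
      = dpfun nums.length (fun p q =>
          if p = m ∧ q < J then tfun nums q + Sacc nums m
          else if p = m ∧ q + 1 = m then Qfold nums m J
          else T2 nums m p q) := by
  subst hJI
  induction J with
  | zero =>
    rw [PySem.List.pyRange_one_eq_nil (by norm_num), List.foldl_nil]
    apply dpfun_congr
    intro p q hp hq
    by_cases hpq : p = m ∧ q + 1 = m
    · rw [if_neg (by omega), if_pos hpq]
      obtain ⟨h1', h2'⟩ := hpq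
      subst h1'
      unfold T2 T1
      rw [if_neg (by omega), if_pos ⟨by omega, by omega, by omega⟩]
      rfl
    · rw [if_neg (by omega), if_neg hpq]
  | succ J ih =>
    have hJm : J < m - 1 := by omega
    have hcast : ((J + 1 : Nat) : Int) = (J : Int) + 1 := by push_cast; ring
    rw [hcast, PySem.List.pyRange_one_succ_right (by positivity), List.foldl_append,
      ih (by omega), List.foldl_cons, List.foldl_nil]
    have em1 : ((m : Int) - 1) = ((m - 1 : Nat) : Int) := by omega
    rw [em1, pyGetD_aGet, pyGetD_aGet, pyGetD_aGet,
      dpfun_read _ _ _ _ (by omega) (by omega)]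
    -- value written first: U J (m-1) J = tfun J + Sacc (m-1)
    have hr1 : (if (m - 1 : Nat) = m ∧ J < J then tfun nums J + Sacc nums m
        else if (m - 1 : Nat) = m ∧ J + 1 = m then Qfold nums m J
        else T2 nums m (m - 1) J) = tfun nums J + Sacc nums (m - 1) := by
      rw [if_neg (by omega), if_neg (by omega), T2_row nums m J h2 hmn hJm]
    rw [hr1]
    have hv1 : tfun nums J + Sacc nums (m - 1) + |aGet nums m - aGet nums (m - 1)|
        = tfun nums J + Sacc nums m := by
      have he : m = (m - 1) + 1 := by omega
      calc tfun nums J + Sacc nums (m - 1) + |aGet nums m - aGet nums (m - 1)|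
          = tfun nums J + Sacc nums ((m - 1) + 1) := by
            rw [Sacc]
            rw [← he]
            ring
        _ = tfun nums J + Sacc nums m := by rw [← he]
    rw [hv1, dpfun_write _ _ _ _ _ hmn (by omega)]
    rw [dpfun_read _ _ _ _ hmn (by omega), dpfun_read _ _ _ _ (by omega) (by omega)]
    rw [if_neg (show ¬((m:Nat) = m ∧ m - 1 = J) from by omega),
      if_neg (show ¬((m:Nat) = m ∧ m - 1 < J) from by omega),
      if_pos (show (m:Nat) = m ∧ m - 1 + 1 = m from ⟨rfl, by omega⟩),
      if_neg (show ¬(m - 1 = m ∧ J = J) from by omega),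
      if_neg (show ¬(m - 1 = m ∧ J < J) from by omega),
      if_neg (show ¬(m - 1 = m ∧ J + 1 = m) from by omega),
      T2_row nums m J h2 hmn hJm,
      dpfun_write _ _ _ _ _ hmn (by omega)]
    apply dpfun_congr
    intro p q hp hq
    by_cases hc1 : p = m ∧ q = m - 1
    · rw [if_pos hc1]
      obtain ⟨ha, hb⟩ := hc1
      subst ha
      subst hb
      rw [if_neg (by omega), if_pos ⟨rfl, by omega⟩, Qfold_succ]
      congr 1
      ring
    · rw [if_neg hc1]
      by_cases hc2 : p = m ∧ q = J
      · rw [if_pos hc2, if_pos ⟨hc2.1, by omega⟩, hc2.2]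
      · rw [if_neg hc2]
        by_cases hc3 : p = m ∧ q < J
        · rw [if_pos hc3, if_pos ⟨hc3.1, by omega⟩]
        · rw [if_neg hc3, if_neg (show ¬(p = m ∧ q < J + 1) from by
            rintro ⟨ha, hb⟩
            rcases Nat.lt_succ_iff_lt_or_eq.mp hb with hb' | hb'
            · exact hc3 ⟨ha, hb'⟩
            · exact hc2 ⟨ha, hb'⟩)]
          by_cases hc4 : p = m ∧ q + 1 = m
          · exact absurd ⟨hc4.1, by omega⟩ hc1
          · rw [if_neg hc4, if_neg hc4]
theorem phase2 (nums : List Int) (m : Nat) (h2 : 2 ≤ m) (hm : m ≤ nums.length) :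
    (PySem.List.pyRange 2 (m : Int) 1).foldl (fun dp i =>
      (PySem.List.pyRange 0 (i - 1) 1).foldl (fun dp j =>
        dpWrite (dpWrite dp i j (dpRead dp (i - 1) j +
            |PySem.List.pyGetD nums i 0 - PySem.List.pyGetD nums (i - 1) 0|))
          i (i - 1)
          (min (dpRead (dpWrite dp i j (dpRead dp (i - 1) j +
              |PySem.List.pyGetD nums i 0 - PySem.List.pyGetD nums (i - 1) 0|)) i (i - 1))
            (dpRead (dpWrite dp i j (dpRead dp (i - 1) j +
              |PySem.List.pyGetD nums i 0 - PySem.List.pyGetD nums (i - 1) 0|)) (i - 1) j +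
              |PySem.List.pyGetD nums i 0 - PySem.List.pyGetD nums j 0|))) dp)
      (dpfun nums.length (T1 nums nums.length))
      = dpfun nums.length (T2 nums m) := by
  induction m, h2 using Nat.le_induction with
  | base =>
    rw [PySem.List.pyRange_one_eq_nil (by norm_num), List.foldl_nil]
    apply dpfun_congr
    intro p q _ _
    unfold T2
    rw [if_neg (by omega)]
  | succ m hm2 ih =>
    have hmn : m < nums.length := by omega
    have hcast : ((m + 1 : Nat) : Int) = (m : Int) + 1 := by push_cast; ring
    rw [hcast, PySem.List.pyRange_one_succ_right (by exact_mod_cast hm2), List.foldl_append,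
      ih (by omega), List.foldl_cons, List.foldl_nil]
    have hfin := inner_loop nums m hm2 hmn ((m : Int) - 1) (m - 1) (by omega) (le_refl _)
    have hU : dpfun nums.length (fun p q =>
        if p = m ∧ q < m - 1 then tfun nums q + Sacc nums m
        else if p = m ∧ q + 1 = m then Qfold nums m (m - 1)
        else T2 nums m p q) = dpfun nums.length (T2 nums (m + 1)) := by
      apply dpfun_congr
      intro p q hp hq
      by_cases hc1 : p = m ∧ q < m - 1
      · rw [if_pos hc1]
        unfold T2
        rw [if_pos ⟨by omega, by omega, by omega⟩, hc1.1]
      · rw [if_neg hc1]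
        by_cases hc2 : p = m ∧ q + 1 = m
        · rw [if_pos hc2, Qfold_final nums m (by omega)]
          unfold T2
          rw [if_pos ⟨by omega, by omega, by omega⟩, hc2.1]
          have : q = m - 1 := by omega
          rw [this]
        · rw [if_neg hc2]
          unfold T2 T1
          split_ifs with c1 c2 c2 <;> first
          | rfl
          | (exfalso; omega)
    exact hfin.trans hU

theorem dpfun_getLast (n : Nat) (f : Nat → Nat → Int) (hne : dpfun n f ≠ []) :
    (dpfun n f).getLast hne = (List.range n).map (f (n - 1)) := by
  rw [List.getLast_eq_getElem]
  unfold dpfun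
  simp

theorem dropLast_map_range {α : Type} (n : Nat) (g : Nat → α) :
    ((List.range n).map g).dropLast = (List.range (n - 1)).map g := by
  cases n with
  | zero => rfl
  | succ k =>
    rw [List.range_succ, List.map_append, List.map_singleton, List.dropLast_concat]
    simp

theorem min_map_add (k : Nat) (f : Nat → Int) (c : Int) :
    (PySem.List.min? ((List.range (k + 1)).map (fun j => f j + c)) (fun x => x)).getD 0
      = c + (((List.range (k + 1)).map f).tail).foldl min (f 0) := by
  rw [List.range_succ_eq_map, List.map_cons, List.map_cons, PySem.List.min?_id_cons,
    Option.getD_some, List.tail_cons, List.map_map, List.map_map]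
  have h := foldl_min_add_int ((List.range k).map (f ∘ Nat.succ)) c (f 0)
  rw [List.map_map] at h
  show ((List.range k).map ((fun x => x + c) ∘ (f ∘ Nat.succ))).foldl min (f 0 + c)
      = c + ((List.range k).map (f ∘ Nat.succ)).foldl min (f 0)
  rw [h]
  ring

theorem chorus_eq (nums : List Int) (h : 2 ≤ nums.length) :
    chorus nums = Sacc nums (nums.length - 1) +
      (((List.range (nums.length - 1)).map (tfun nums)).tail).foldl min (tfun nums 0) := by
  have e : chorus nums = (PySem.List.min? (PySem.List.slice (PySem.List.pyGetD
      ((PySem.List.pyRange 2 (nums.length : Int) 1).foldl (fun dp i =>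
        (PySem.List.pyRange 0 (i - 1) 1).foldl (fun dp j =>
          dpWrite (dpWrite dp i j (dpRead dp (i - 1) j +
              |PySem.List.pyGetD nums i 0 - PySem.List.pyGetD nums (i - 1) 0|))
            i (i - 1)
            (min (dpRead (dpWrite dp i j (dpRead dp (i - 1) j +
                |PySem.List.pyGetD nums i 0 - PySem.List.pyGetD nums (i - 1) 0|)) i (i - 1))
              (dpRead (dpWrite dp i j (dpRead dp (i - 1) j +
                |PySem.List.pyGetD nums i 0 - PySem.List.pyGetD nums (i - 1) 0|)) (i - 1) j +
                |PySem.List.pyGetD nums i 0 - PySem.List.pyGetD nums j 0|))) dp)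
        ((PySem.List.pyRange 2 (nums.length : Int) 1).foldl (fun dp i =>
          dpWrite dp i (i - 1) (dpRead dp (i - 1) (i - 2) +
            |PySem.List.pyGetD nums (i - 1) 0 - PySem.List.pyGetD nums (i - 2) 0|))
          (List.replicate nums.length (List.replicate nums.length (0 : Int)))))
      (-1) []) none (some (-1))) (fun x => x)).getD 0 := rfl
  rw [e, phase1 nums nums.length (le_refl _), phase2 nums nums.length h (le_refl _)]
  have hne : dpfun nums.length (T2 nums nums.length) ≠ [] := by
    unfold dpfun
    simp only [ne_eq, List.map_eq_nil_iff, List.range_eq_nil]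
    omega
  rw [PySem.List.pyGetD_neg_one _ _ hne, dpfun_getLast _ _ hne, PySem.List.slice_to_neg_one,
    dropLast_map_range]
  rw [show (List.range (nums.length - 1)).map (T2 nums nums.length (nums.length - 1))
      = (List.range (nums.length - 1)).map
        (fun j => tfun nums j + Sacc nums (nums.length - 1)) from
    List.map_congr_left (by
      intro j hj
      have hj' : j < nums.length - 1 := List.mem_range.mp hj
      unfold T2
      split_ifs with hc
      · rfl
      · have hn2 : nums.length = 2 := by omega
        have hj0 : j = 0 := by omega
        rw [hn2] at *
        rw [hj0]
        unfold T1
        rw [if_neg (by omega), tfun_zero]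
        ring)]
  rw [show nums.length - 1 = (nums.length - 2) + 1 from by omega]
  exact min_map_add (nums.length - 2) (tfun nums) (Sacc nums ((nums.length - 2) + 1))

theorem altT (nums : List Int) (m : Nat) (h1 : 1 ≤ m) :
    (PySem.List.pyRange 1 (m : Int) 1).foldl (fun t r =>
        t ++ [((PySem.List.pyRange 0 r 1).foldl (fun best j =>
            min best (PySem.List.pyGetD t j 0 +
              |PySem.List.pyGetD nums (r + 1) 0 - PySem.List.pyGetD nums j 0|)) 0)
          - |PySem.List.pyGetD nums (r + 1) 0 - PySem.List.pyGetD nums r 0|])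
      [-|PySem.List.pyGetD nums 1 0 - PySem.List.pyGetD nums 0 0|]
      = tvec nums m := by
  induction m, h1 using Nat.le_induction with
  | base =>
    rw [PySem.List.pyRange_one_eq_nil (by norm_num), List.foldl_nil]
    show _ = tvec nums (0 + 1)
    rw [tvec_succ]
    simp [tvec, aGet, PySem.List.pyGetD_ofNat']
  | succ m hm1 ih =>
    have hcast : ((m + 1 : Nat) : Int) = (m : Int) + 1 := by push_cast; ring
    rw [hcast, PySem.List.pyRange_one_succ_right (by exact_mod_cast hm1), List.foldl_append,
      ih, List.foldl_cons, List.foldl_nil, tvec_succ]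
    congr 1
    rw [show ((m : Int) + 1) = ((m + 1 : Nat) : Int) from by push_cast; ring, pyGetD_aGet,
      pyGetD_aGet, PySem.List.pyRange_zero_nat, List.foldl_map]
    congr 1
    congr 1
    apply PySem.List.foldl_congr_mem
    intro acc x hx
    simp only [PySem.List.pyGetD_natCast]
    rfl

theorem altTotal (nums : List Int) (m : Nat) :
    (PySem.List.pyRange 1 ((m : Int) + 1) 1).foldl (fun acc k =>
        acc + |PySem.List.pyGetD nums k 0 - PySem.List.pyGetD nums (k - 1) 0|) 0
      = Sacc nums m := by
  induction m with
  | zero =>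
    rw [show ((0 : Nat) : Int) + 1 = 1 from by norm_num,
      PySem.List.pyRange_one_eq_nil (le_refl _), List.foldl_nil]
    rfl
  | succ m ih =>
    rw [show ((m + 1 : Nat) : Int) + 1 = ((m : Int) + 1) + 1 from by push_cast; ring,
      PySem.List.pyRange_one_succ_right (by omega), List.foldl_append, ih,
      List.foldl_cons, List.foldl_nil]
    rw [show ((m : Int) + 1) = ((m + 1 : Nat) : Int) from by push_cast; ring, pyGetD_aGet,
      show ((m + 1 : Nat) : Int) - 1 = ((m : Nat) : Int) from by push_cast; ring, pyGetD_aGet]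
    rfl

theorem chorus_alt_eq (nums : List Int) (h : 2 ≤ nums.length) :
    chorus_alt nums = Sacc nums (nums.length - 1) +
      (((List.range (nums.length - 1)).map (tfun nums)).tail).foldl min (tfun nums 0) := by
  have e : chorus_alt nums = ((PySem.List.pyRange 1 (nums.length : Int) 1).foldl (fun acc k =>
        acc + |PySem.List.pyGetD nums k 0 - PySem.List.pyGetD nums (k - 1) 0|) 0)
      + (PySem.List.min? ((PySem.List.pyRange 1 ((nums.length : Int) - 1) 1).foldl (fun t r =>
          t ++ [((PySem.List.pyRange 0 r 1).foldl (fun best j =>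
              min best (PySem.List.pyGetD t j 0 +
                |PySem.List.pyGetD nums (r + 1) 0 - PySem.List.pyGetD nums j 0|)) 0)
            - |PySem.List.pyGetD nums (r + 1) 0 - PySem.List.pyGetD nums r 0|])
        [-|PySem.List.pyGetD nums 1 0 - PySem.List.pyGetD nums 0 0|])
        (fun x => x)).getD 0 := rfl
  rw [e, show ((nums.length : Int) - 1) = ((nums.length - 1 : Nat) : Int) from by omega,
    altT nums (nums.length - 1) (by omega),
    show (nums.length : Int) = ((nums.length - 1 : Nat) : Int) + 1 from by omega,
    altTotal nums (nums.length - 1)]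
  congr 1
  rw [tvec_eq_map, show nums.length - 1 = (nums.length - 2) + 1 from by omega,
    List.range_succ_eq_map, List.map_cons, PySem.List.min?_id_cons, Option.getD_some,
    List.tail_cons]

-- ===== VERDICT (by name: the statement is the Claim_ definition above) =====
theorem chorus_spec : Claim_equal_chorus := by
  intro nums _ hpre
  unfold Spec_chorus
  rw [chorus_eq nums hpre, chorus_alt_eq nums hpre]
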